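-- pv_equiv track=rewrite | github.com/ssorj/pumpjack | python/pumpjack/python.py | _studly_name
-- ===== SOURCE A (Python) =====
-- def _studly_name(name):
--     assert name
--
--     chars = list()
--     prev = None
--     curr = None
--
--     for i in range(len(name)):
--         curr = name[i]
--
--         if prev == "-":
--             curr = curr.upper()
--
--         if curr != "-":
--             chars.append(curr)
--
--         prev = curr
--
--     return "".join(chars)
-- ===== SOURCE B (Python) =====
-- def _studly_name(name):
--     assert name
--     parts = name.split('-')
--     return parts[0] + ''.join(p[:1].upper() + p[1:] for p in parts[1:])
-- ===== Notes on version B (the rewrite author's own statement) =====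
-- stated objective: faster
-- what changed: Replaces the per-character index loop with prev-state tracking by splitting the name on hyphens and uppercasing the first letter of each later segment (the split and join run in C, removing the per-character interpreter work); Pre_ excludes only the empty string, on which both programs raise AssertionError.
import Mathlib
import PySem

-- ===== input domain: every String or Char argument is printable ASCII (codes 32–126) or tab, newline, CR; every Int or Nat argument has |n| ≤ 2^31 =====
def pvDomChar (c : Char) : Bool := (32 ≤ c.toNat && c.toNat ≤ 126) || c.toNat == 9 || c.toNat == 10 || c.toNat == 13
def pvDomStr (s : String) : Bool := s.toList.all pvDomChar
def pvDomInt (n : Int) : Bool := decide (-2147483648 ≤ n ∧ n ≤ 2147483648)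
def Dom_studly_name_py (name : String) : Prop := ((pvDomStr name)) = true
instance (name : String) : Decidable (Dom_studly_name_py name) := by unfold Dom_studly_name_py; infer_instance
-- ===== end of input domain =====

-- B is the idiomatic split-then-capitalize version of A's char-by-char loop; equal return values on every
-- nonempty string (both programs raise AssertionError on the empty string).

-- ===== PORT A =====
-- the for-loop of A: state = (chars so far, prev); curr is uppercased after a '-', dashes are dropped
def studlyLoopA : List Char → List Char → Option Char → List Char
  | [], chars, _ => chars
  | c :: rest, chars, prev =>
      let curr := if prev = some '-' then PySem.Chars.upperChar c else c
      let chars' := if curr ≠ '-' then chars ++ [curr] else chars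
      studlyLoopA rest chars' (some curr)

def studly_name_py (name : String) : String :=
  String.mk (studlyLoopA name.toList [] none)

-- ===== PORT B =====
-- p[:1].upper() + p[1:]
def capFirst : List Char → List Char
  | [] => []
  | c :: cs => PySem.Chars.upperChar c :: cs

def studly_name_py_alt (name : String) : String :=
  let parts := name.toList.splitOn '-'       -- name.split('-')
  String.mk (parts.headD [] ++ ((parts.tail.map capFirst).flatten))   -- parts[0] + ''.join(...)

-- ===== PRECONDITION & SPEC =====
-- Pre_ excludes only the empty string, on which both A and B raise AssertionError from their assert.
def Pre_studly_name_py (name : String) : Prop := name ≠ ""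
instance (name : String) : Decidable (Pre_studly_name_py name) := by unfold Pre_studly_name_py; infer_instance
def pvWitness_studly_name_py : String := "ab-cd"
def Spec_studly_name_py (name : String) (out : String) : Prop := out = studly_name_py_alt name
instance (name : String) (out : String) : Decidable (Spec_studly_name_py name out) := by unfold Spec_studly_name_py; infer_instance

-- ===== CLAIM (what is proved, stated in full; the proofs are below) =====
def Claim_equal_studly_name_py : Prop := ∀ (name : String), Dom_studly_name_py name → Pre_studly_name_py name → Spec_studly_name_py name (studly_name_py name)

-- ===== LEMMAS AND PROOFS =====

-- str.upper of a single char maps '-' and only '-' to '-'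
theorem upperChar_eq_dash_iff (c : Char) : (PySem.Chars.upperChar c = '-') ↔ c = '-' := by
  unfold PySem.Chars.upperChar PySem.Chars.islower
  split_ifs with h
  · simp only [Bool.and_eq_true, decide_eq_true_eq, Char.le_def] at h
    have h1 : 97 ≤ c.toNat := h.1
    have h2 : c.toNat ≤ 122 := h.2
    have hd : ('-' : Char).toNat = 45 := by decide
    constructor
    · intro he
      have ht := congrArg Char.toNat he
      rw [Char.toNat_ofNat] at ht
      rw [if_pos (Or.inl (by omega : c.toNat - 32 < 0xd800))] at ht
      omega
    · intro he
      exfalso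
      have := congrArg Char.toNat he
      omega
  · exact Iff.rfl

-- A's loop, with the accumulator factored out: the flag records whether the previous ORIGINAL char was '-'
def studlyCore : List Char → Bool → List Char
  | [], _ => []
  | c :: rest, flag =>
      if c = '-' then studlyCore rest true
      else (if flag then PySem.Chars.upperChar c else c) :: studlyCore rest false

theorem studlyLoopA_eq_core (l : List Char) : ∀ (chars : List Char) (prev : Option Char),
    studlyLoopA l chars prev = chars ++ studlyCore l (decide (prev = some '-')) := by
  induction l with
  | nil => intro chars prev; simp [studlyLoopA, studlyCore]
  | cons c rest ih =>
    intro chars prev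
    by_cases hp : prev = some '-'
    · by_cases hc : c = '-'
      · subst hc
        simp [studlyLoopA, studlyCore, hp, PySem.Chars.upperChar, PySem.Chars.islower, ih]
      · have hu : PySem.Chars.upperChar c ≠ '-' := fun h => hc ((upperChar_eq_dash_iff c).mp h)
        simp [studlyLoopA, studlyCore, hp, hc, hu, ih]
    · by_cases hc : c = '-'
      · subst hc
        simp [studlyLoopA, studlyCore, hp, ih]
      · simp [studlyLoopA, studlyCore, hp, hc, ih]

-- B's expression, parameterised by whether the head segment gets capitalized
def studlySplit (l : List Char) (flag : Bool) : List Char :=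
  let parts := l.splitOn '-'
  (if flag then capFirst (parts.headD []) else parts.headD []) ++ (parts.tail.map capFirst).flatten

theorem core_eq_split (l : List Char) : ∀ flag, studlyCore l flag = studlySplit l flag := by
  induction l with
  | nil => intro flag; cases flag <;> simp [studlyCore, studlySplit, List.splitOn, List.splitOnP_nil, capFirst]
  | cons c rest ih =>
    intro flag
    by_cases hc : c = '-'
    · subst hc
      have hcons : List.splitOn '-' ('-' :: rest) = [] :: List.splitOn '-' rest := by
        simp [List.splitOn, List.splitOnP_cons]
      obtain ⟨p, ps, hps⟩ := List.exists_cons_of_ne_nil (List.splitOnP_ne_nil (· == '-') rest)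
      have hps' : List.splitOn '-' rest = p :: ps := hps
      cases flag <;>
        simp [studlyCore, studlySplit, hcons, hps', ih true, capFirst]
    · have hcons : List.splitOn '-' (c :: rest) =
          List.modifyHead (List.cons c) (List.splitOn '-' rest) := by
        simp [List.splitOn, List.splitOnP_cons, hc]
      obtain ⟨p, ps, hps⟩ := List.exists_cons_of_ne_nil (List.splitOnP_ne_nil (· == '-') rest)
      have hps' : List.splitOn '-' rest = p :: ps := hps
      cases flag <;>
        simp [studlyCore, studlySplit, hc, hcons, hps', ih false, capFirst]

-- ===== VERDICT (by name: the statement is the Claim_ definition above) =====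
theorem studly_name_py_spec : Claim_equal_studly_name_py := by
  intro name _ _
  unfold Spec_studly_name_py studly_name_py studly_name_py_alt
  rw [studlyLoopA_eq_core]
  simp only [List.nil_append]
  rw [show (decide ((none : Option Char) = some '-')) = false from rfl]
  rw [core_eq_split]
  rfl
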